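-- pv_equiv track=rewrite | github.com/future-agi/future-agi | futureagi/model_hub/models/choices.py | _is_boolean_string_column
-- ===== SOURCE A (Python) =====
-- def _is_boolean_string_column(str_values):
--     """
--     Check if all string values are boolean representations.
--     Handles strings like "true", "false", "True", "False", "TRUE", "FALSE" from CSV files.
--     """
--     if not str_values:
--         return False
--     boolean_values = {"true", "false", "0", "1"}
--     for val in str_values:
--         if val and val.lower() not in boolean_values:
--             return False
--     return True
-- ===== SOURCE B (Python) =====
-- def _ci_equal(v, word):
--     # case-insensitive comparison against a lowercase ASCII word, char by char
--     if len(v) != len(word):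
--         return False
--     for c, t in zip(v, word):
--         if c != t and ord(c) != ord(t) - 32:
--             return False
--     return True
--
--
-- def _bool_like(v):
--     if not v or v == "0" or v == "1":
--         return True
--     return _ci_equal(v, "true") or _ci_equal(v, "false")
--
--
-- def _is_boolean_string_column(str_values):
--     if not str_values:
--         return False
--     return all(_bool_like(v) for v in str_values)
-- ===== Notes on version B (the rewrite author's own statement) =====
-- stated objective: alternative
-- what changed: Instead of lowercasing each value and testing membership in a set, B classifies each value directly: empty or exactly "0"/"1", or a character-by-character case-insensitive match (c == t or ord(c) == ord(t) - 32) against the literal words "true"/"false" after a length check, with no lower() and no set.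
import Mathlib
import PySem

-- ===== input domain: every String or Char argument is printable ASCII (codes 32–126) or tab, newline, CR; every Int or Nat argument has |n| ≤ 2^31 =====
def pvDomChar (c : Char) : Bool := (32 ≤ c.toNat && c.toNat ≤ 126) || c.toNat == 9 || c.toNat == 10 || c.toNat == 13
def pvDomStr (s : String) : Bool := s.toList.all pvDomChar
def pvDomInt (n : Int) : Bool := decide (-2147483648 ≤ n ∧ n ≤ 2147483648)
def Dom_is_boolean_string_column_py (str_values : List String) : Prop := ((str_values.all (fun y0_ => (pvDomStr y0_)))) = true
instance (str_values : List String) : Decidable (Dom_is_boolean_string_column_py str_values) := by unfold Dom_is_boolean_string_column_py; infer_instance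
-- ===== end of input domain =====

set_option maxRecDepth 8192

-- B replaces A's lowercase-then-set-membership scan with a per-value length dispatch and
-- character-by-character case-insensitive comparison against the literal words (objective: alternative).


-- ===== PORT A =====
-- boolean_values = {"true", "false", "0", "1"}
def pvBooleanValues : PySem.Set String := PySem.Set.ofList ["true", "false", "0", "1"]

-- the 'for val in str_values' loop with its early 'return False'
def pvLoopA : List String → Bool
  | [] => true
  | val :: rest =>
      if val ≠ "" ∧ ¬ PySem.Set.contains pvBooleanValues (PySem.Str.lower val) then false
      else pvLoopA rest

def is_boolean_string_column_py (str_values : List String) : Bool :=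
  if str_values = [] then false
  else pvLoopA str_values

-- ===== PORT B =====
-- _ci_equal(v, word): length check, then the zip loop 'c != t and ord(c) != ord(t) - 32' with early return
def pvCiEqual : List Char → List Char → Bool
  | [], [] => true
  | c :: cs, t :: ts => (c == t || c.toNat == t.toNat - 32) && pvCiEqual cs ts
  | _, _ => false

-- _bool_like(v)
def pvBoolLike (v : String) : Bool :=
  if v = "" ∨ v = "0" ∨ v = "1" then true
  else pvCiEqual v.toList "true".toList || pvCiEqual v.toList "false".toList

def is_boolean_string_column_py_alt (str_values : List String) : Bool :=
  if str_values = [] then false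
  else str_values.all pvBoolLike

-- ===== PRECONDITION & SPEC =====
def Spec_is_boolean_string_column_py (str_values : List String) (out : Bool) : Prop := out = is_boolean_string_column_py_alt str_values
instance (str_values : List String) (out : Bool) : Decidable (Spec_is_boolean_string_column_py str_values out) := by unfold Spec_is_boolean_string_column_py; infer_instance

-- ===== CLAIM (what is proved, stated in full; the proofs are below) =====
def Claim_equal_is_boolean_string_column_py : Prop := ∀ (str_values : List String), Dom_is_boolean_string_column_py str_values → Spec_is_boolean_string_column_py str_values (is_boolean_string_column_py str_values)

-- ===== LEMMAS AND PROOFS =====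
lemma char_eq_iff_toNat (a b : Char) : a = b ↔ a.toNat = b.toNat := by
  constructor
  · intro h; rw [h]
  · intro h
    apply Char.ext
    apply UInt32.toNat_inj.mp
    exact h

lemma char_le_iff (a b : Char) : (a ≤ b) ↔ a.toNat ≤ b.toNat := Iff.rfl

-- lowering hits a lowercase letter t iff the char is t or its uppercase partner
lemma pvLowerChar_eq_iff (c t : Char) (h1 : 97 ≤ t.toNat) (h2 : t.toNat ≤ 122) :
    PySem.Chars.lowerChar c = t ↔ (c = t ∨ c.toNat = t.toNat - 32) := by
  unfold PySem.Chars.lowerChar PySem.Chars.isupper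
  by_cases hu : (decide ('A' ≤ c) && decide (c ≤ 'Z')) = true
  · have hb : 65 ≤ c.toNat ∧ c.toNat ≤ 90 := by
      simp only [Bool.and_eq_true, decide_eq_true_eq, char_le_iff] at hu
      exact hu
    rw [if_pos hu]
    have hv : (c.toNat + 32).isValidChar := Or.inl (by omega)
    have hofNat : (Char.ofNat (c.toNat + 32)).toNat = c.toNat + 32 := by
      simp [Char.toNat_ofNat, hv]
    rw [char_eq_iff_toNat, char_eq_iff_toNat, hofNat]
    omega
  · rw [if_neg (by simpa using hu)]
    simp only [Bool.and_eq_true, decide_eq_true_eq, char_le_iff, not_and_or, not_le] at hu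
    rw [char_eq_iff_toNat c t]
    have hA : ('A' : Char).toNat = 65 := by decide
    have hZ : ('Z' : Char).toNat = 90 := by decide
    omega

-- lowering hits a non-letter t (code < 65) iff the char is t itself
lemma pvLowerChar_eq_digit (c t : Char) (h : t.toNat < 65) :
    PySem.Chars.lowerChar c = t ↔ c = t := by
  unfold PySem.Chars.lowerChar PySem.Chars.isupper
  by_cases hu : (decide ('A' ≤ c) && decide (c ≤ 'Z')) = true
  · have hb : 65 ≤ c.toNat ∧ c.toNat ≤ 90 := by
      simp only [Bool.and_eq_true, decide_eq_true_eq, char_le_iff] at hu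
      exact hu
    rw [if_pos hu]
    have hv : (c.toNat + 32).isValidChar := Or.inl (by omega)
    have hofNat : (Char.ofNat (c.toNat + 32)).toNat = c.toNat + 32 := by
      simp [Char.toNat_ofNat, hv]
    rw [char_eq_iff_toNat, char_eq_iff_toNat, hofNat]
    omega
  · rw [if_neg (by simpa using hu)]

lemma pvCiEqual_iff (cs ts : List Char) (h : ∀ t ∈ ts, 97 ≤ t.toNat ∧ t.toNat ≤ 122) :
    pvCiEqual cs ts = true ↔ PySem.Chars.lower cs = ts := by
  induction cs generalizing ts with
  | nil =>
      cases ts with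
      | nil => simp [pvCiEqual, PySem.Chars.lower]
      | cons t ts => simp [pvCiEqual, PySem.Chars.lower]
  | cons c cs ih =>
      cases ts with
      | nil => simp [pvCiEqual, PySem.Chars.lower]
      | cons t ts =>
          have ht := h t (List.mem_cons_self)
          have hts : ∀ t' ∈ ts, 97 ≤ t'.toNat ∧ t'.toNat ≤ 122 :=
            fun t' ht' => h t' (List.mem_cons_of_mem _ ht')
          simp only [pvCiEqual, Bool.and_eq_true, Bool.or_eq_true, beq_iff_eq,
            PySem.Chars.lower, List.map_cons, List.cons.injEq, ih ts hts]
          rw [pvLowerChar_eq_iff c t ht.1 ht.2]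

lemma pvLower_eq_singleton (cs : List Char) (t : Char) (h : t.toNat < 65) :
    PySem.Chars.lower cs = [t] ↔ cs = [t] := by
  cases cs with
  | nil => simp [PySem.Chars.lower]
  | cons c cs' =>
      cases cs' with
      | nil => simp [PySem.Chars.lower, pvLowerChar_eq_digit c t h]
      | cons d ds => simp [PySem.Chars.lower]

lemma string_eq_iff_toList (s t : String) : s = t ↔ s.toList = t.toList := by
  constructor
  · intro h; rw [h]
  · intro h; exact String.toList_injective h

lemma pvContains_iff (s : String) :
    PySem.Set.contains pvBooleanValues s = true ↔ s ∈ (["true", "false", "0", "1"] : List String) := by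
  simp [pvBooleanValues, PySem.Set.contains, PySem.Set.ofList]

-- per-element: A's pass condition equals B's _bool_like
lemma pvElem_iff (v : String) :
    pvBoolLike v = true ↔ (v = "" ∨ PySem.Set.contains pvBooleanValues (PySem.Str.lower v) = true) := by
  have hlow : (PySem.Str.lower v).toList = PySem.Chars.lower v.toList := by
    simp [PySem.Str.lower]
  rw [pvContains_iff]
  unfold pvBoolLike
  have htrue : ∀ t ∈ ("true".toList : List Char), 97 ≤ t.toNat ∧ t.toNat ≤ 122 := by
    intro t ht
    rw [show ("true".toList : List Char) = ['t','r','u','e'] from rfl] at ht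
    simp only [List.mem_cons, List.not_mem_nil, or_false] at ht
    rcases ht with rfl | rfl | rfl | rfl <;> exact (by decide)
  have hfalse : ∀ t ∈ ("false".toList : List Char), 97 ≤ t.toNat ∧ t.toNat ≤ 122 := by
    intro t ht
    rw [show ("false".toList : List Char) = ['f','a','l','s','e'] from rfl] at ht
    simp only [List.mem_cons, List.not_mem_nil, or_false] at ht
    rcases ht with rfl | rfl | rfl | rfl | rfl <;> exact (by decide)
  split_ifs with h
  · simp only [true_iff]
    rcases h with h | h | h
    · exact Or.inl h
    · right
      have : PySem.Str.lower v = "0" := by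
        rw [string_eq_iff_toList, hlow, h]
        decide
      simp [this]
    · right
      have : PySem.Str.lower v = "1" := by
        rw [string_eq_iff_toList, hlow, h]
        decide
      simp [this]
  · push Not at h
    rw [Bool.or_eq_true, pvCiEqual_iff _ _ htrue, pvCiEqual_iff _ _ hfalse]
    simp only [List.mem_cons, List.not_mem_nil, or_false]
    rw [string_eq_iff_toList (PySem.Str.lower v) "true", string_eq_iff_toList (PySem.Str.lower v) "false",
        string_eq_iff_toList (PySem.Str.lower v) "0", string_eq_iff_toList (PySem.Str.lower v) "1", hlow]
    constructor
    · rintro (ht | hf)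
      · exact Or.inr (Or.inl ht)
      · exact Or.inr (Or.inr (Or.inl hf))
    · rintro (hv | ht | hf | h0 | h1)
      · exact absurd hv h.1
      · exact Or.inl ht
      · exact Or.inr hf
      · exact absurd ((string_eq_iff_toList v "0").mpr
          ((pvLower_eq_singleton _ '0' (by decide)).mp (by simpa using h0))) h.2.1
      · exact absurd ((string_eq_iff_toList v "1").mpr
          ((pvLower_eq_singleton _ '1' (by decide)).mp (by simpa using h1))) h.2.2

lemma pvLoopA_iff (xs : List String) :
    pvLoopA xs = true ↔ xs.all pvBoolLike = true := by
  induction xs with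
  | nil => simp [pvLoopA]
  | cons val rest ih =>
      rw [pvLoopA, List.all_cons, Bool.and_eq_true, ← ih]
      split_ifs with h
      · simp only [false_iff, not_and]
        intro hb
        rcases (pvElem_iff val).mp hb with he | hc
        · exact absurd he h.1
        · exact absurd hc h.2
      · constructor
        · intro hl
          refine ⟨(pvElem_iff val).mpr ?_, hl⟩
          by_cases he : val = ""
          · exact Or.inl he
          · right
            by_contra hc
            exact h ⟨he, fun hc' => hc hc'⟩
        · exact fun hp => hp.2

-- ===== VERDICT (by name: the statement is the Claim_ definition above) =====
theorem is_boolean_string_column_py_spec : Claim_equal_is_boolean_string_column_py := by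
  intro xs _
  unfold Spec_is_boolean_string_column_py is_boolean_string_column_py is_boolean_string_column_py_alt
  split_ifs with h
  · rfl
  · exact Bool.eq_iff_iff.mpr ((pvLoopA_iff xs).trans (by simp))
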